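-- pv_equiv track=rewrite | github.com/pypi-data/pypi-mirror-213 | packages/sd-sdk-python/sd_sdk_python-0.2.5.tar.gz/sd_sdk_python-0.2.5/sd_sdk_python/sd_sdk.py | device_name_to_parameters
-- ===== SOURCE A (Python) =====
-- def device_name_to_parameters(name):
--     params = [0]*8
--     encoded_bytes = []
--     for character in name:
--         enc = character.encode('utf-8')
--         # Clip length to 22 bytes (maximum allowable name length)
--         if (len(encoded_bytes) + len(enc)) > 22:
--             break
--         encoded_bytes += [int(w) for w in enc]
--
--     # Pack encoded_bytes into 24-bit parameters
--     for i in range(0, len(encoded_bytes), 3):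
--         value = 0
--         substr = encoded_bytes[i:i+3]
--         for j, char in enumerate(substr):
--             value |= (char << (16 - j*8))
--         params[i // 3] = value
--     return params
-- ===== SOURCE B (Python) =====
-- def device_name_to_parameters(name):
--     # Fused single pass: feed UTF-8 bytes through a 3-byte buffer, emitting each
--     # packed 24-bit word as soon as it is full; no intermediate full byte list.
--     params = [0] * 8
--     idx = 0
--     buf = []
--     count = 0
--     for character in name:
--         enc = character.encode('utf-8')
--         # Clip length to 22 bytes (maximum allowable name length)
--         if count + len(enc) > 22:
--             break
--         count += len(enc)
--         for b in enc:
--             buf.append(b)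
--             if len(buf) == 3:
--                 params[idx] = (buf[0] << 16) | (buf[1] << 8) | buf[2]
--                 idx += 1
--                 buf = []
--     if buf:
--         buf += [0] * (3 - len(buf))
--         params[idx] = (buf[0] << 16) | (buf[1] << 8) | buf[2]
--     return params
-- ===== Notes on version B (the rewrite author's own statement) =====
-- stated objective: alternative
-- what changed: B fuses A's two phases (build a clipped byte list, then a step-3 range loop slicing and packing it) into a single pass that streams each UTF-8 byte through a 3-byte buffer and emits every packed 24-bit word as soon as it fills, packing the zero-padded leftover at the end; no intermediate byte list and no slicing pass.
import Mathlib
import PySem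

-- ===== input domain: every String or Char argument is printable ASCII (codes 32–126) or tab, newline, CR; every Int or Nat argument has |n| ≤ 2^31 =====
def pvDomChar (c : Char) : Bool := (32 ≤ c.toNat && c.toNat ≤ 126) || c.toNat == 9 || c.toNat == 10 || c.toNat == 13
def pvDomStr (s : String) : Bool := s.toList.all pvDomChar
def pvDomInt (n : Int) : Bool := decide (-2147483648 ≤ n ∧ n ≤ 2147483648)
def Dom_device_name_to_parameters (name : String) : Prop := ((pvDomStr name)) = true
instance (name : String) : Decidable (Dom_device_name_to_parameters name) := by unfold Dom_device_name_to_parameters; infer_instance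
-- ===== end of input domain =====

-- B fuses A's two phases (collect clipped byte list, then slice-and-pack) into one pass
-- that packs each 24-bit word as soon as its 3 bytes arrive (objective: alternative).


-- character.encode('utf-8') as a list of byte values; exact UTF-8 for every Unicode scalar value
def pvUtf8 (c : Char) : List Int :=
  let n := c.toNat
  if n < 128 then [(n : Int)]
  else if n < 2048 then [(192 + n / 64 : Nat), (128 + n % 64 : Nat)].map (Int.ofNat)
  else if n < 65536 then
    [(224 + n / 4096 : Nat), (128 + (n / 64) % 64 : Nat), (128 + n % 64 : Nat)].map (Int.ofNat)
  else
    [(240 + n / 262144 : Nat), (128 + (n / 4096) % 64 : Nat),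
     (128 + (n / 64) % 64 : Nat), (128 + n % 64 : Nat)].map (Int.ofNat)

-- ===== PORT A =====
-- A's first loop: build encoded_bytes, breaking when the clip would be exceeded
def pvCollect : List Char → List Int → List Int
  | [], acc => acc
  | c :: cs, acc =>
    let enc := pvUtf8 c
    if (acc.length : Int) + enc.length > 22 then acc
    else pvCollect cs (acc ++ enc)

-- A's inner pack loop: value |= char << (16 - j*8); .toNat exact here since only j ≤ 2 occurs
def pvPackWord (substr : List Int) : Int :=
  (PySem.List.enumerate substr).foldl
    (fun v jc => PySem.Int.bor v (jc.2 <<< ((16 - jc.1 * 8).toNat))) 0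

def device_name_to_parameters (name : String) : List Int :=
  let params : List Int := List.replicate 8 0
  let encoded := pvCollect name.toList []
  -- params[i // 3] = value; the index is in range (encoded ≤ 22 bytes), so List.set is exact
  (PySem.List.pyRange 0 (encoded.length : Int) 3).foldl
    (fun params i =>
      params.set (PySem.Int.floordiv i 3).toNat
        (pvPackWord (PySem.List.slice encoded (some i) (some (i + 3))))) params

-- ===== PORT B =====
-- (buf[0] << 16) | (buf[1] << 8) | buf[2]; indices are in range whenever B reads them
def pvWord3 (buf : List Int) : Int :=
  PySem.Int.bor (PySem.Int.bor (PySem.List.pyGetD buf 0 0 <<< (16 : Nat))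
                               (PySem.List.pyGetD buf 1 0 <<< (8 : Nat)))
                (PySem.List.pyGetD buf 2 0)

-- B's inner byte loop body: push one byte, emit a packed word when 3 have accumulated
def pvFeed : (List Int × Nat × List Int) → Int → (List Int × Nat × List Int)
  | (params, idx, buf), b =>
    let buf := buf ++ [b]
    if buf.length == 3 then (params.set idx (pvWord3 buf), idx + 1, [])
    else (params, idx, buf)

-- B's character loop, carrying (params, idx, buf, count)
def pvLoopB : List Char → (List Int × Nat × List Int × Int) → (List Int × Nat × List Int × Int)
  | [], st => st
  | c :: cs, (params, idx, buf, count) =>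
    let enc := pvUtf8 c
    if count + (enc.length : Int) > 22 then (params, idx, buf, count)
    else
      let t := enc.foldl pvFeed (params, idx, buf)
      pvLoopB cs (t.1, t.2.1, t.2.2, count + enc.length)

def device_name_to_parameters_alt (name : String) : List Int :=
  let st := pvLoopB name.toList (List.replicate 8 0, 0, [], 0)
  let params := st.1; let idx := st.2.1; let buf := st.2.2.1
  if buf.isEmpty then params
  else params.set idx (pvWord3 (buf ++ List.replicate (3 - buf.length) 0))

-- ===== PRECONDITION & SPEC =====
def Spec_device_name_to_parameters (name : String) (out : List Int) : Prop := out = device_name_to_parameters_alt name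
instance (name : String) (out : List Int) : Decidable (Spec_device_name_to_parameters name out) := by unfold Spec_device_name_to_parameters; infer_instance

-- ===== CLAIM (what is proved, stated in full; the proofs are below) =====
def Claim_equal_device_name_to_parameters : Prop := ∀ (name : String), Dom_device_name_to_parameters name → Spec_device_name_to_parameters name (device_name_to_parameters name)

-- ===== LEMMAS AND PROOFS =====

-- the packed words of a byte list, three bytes at a time, leftover zero-padded
def pvWords : List Int → List Int
  | [] => []
  | [a] => [pvWord3 [a, 0, 0]]
  | [a, b] => [pvWord3 [a, b, 0]]
  | a :: b :: c :: rest => pvWord3 [a, b, c] :: pvWords rest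

-- write words into consecutive slots starting at m
def pvApply (p : List Int) : List Int → Nat → List Int
  | [], _ => p
  | w :: ws, m => pvApply (p.set m w) ws (m + 1)

theorem pvBor_zero_left (x : Int) : PySem.Int.bor 0 x = x := by
  rw [PySem.Int.bor_comm, PySem.Int.bor_zero]

theorem pvPackWord_three (a b c : Int) : pvPackWord [a, b, c] = pvWord3 [a, b, c] := by
  simp [pvPackWord, pvWord3, PySem.List.enumerate, PySem.List.pyGetD, pvBor_zero_left]

theorem pvPackWord_two (a b : Int) : pvPackWord [a, b] = pvWord3 [a, b, 0] := by
  simp [pvPackWord, pvWord3, PySem.List.enumerate, PySem.List.pyGetD, pvBor_zero_left]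

theorem pvPackWord_one (a : Int) : pvPackWord [a] = pvWord3 [a, 0, 0] := by
  simp [pvPackWord, pvWord3, PySem.List.enumerate, PySem.List.pyGetD, pvBor_zero_left]

theorem pvRange3_nil (a b : Int) (h : b ≤ a) : PySem.List.pyRange a b 3 = [] := by
  rw [PySem.List.pyRange_of_pos a b (by norm_num)]
  simp [show ¬ a < b by omega]

theorem pvRange3_cons (a b : Int) (h : a < b) :
    PySem.List.pyRange a b 3 = a :: PySem.List.pyRange (a + 3) b 3 := by
  rw [PySem.List.pyRange_of_pos a b (by norm_num),
      PySem.List.pyRange_of_pos (a + 3) b (by norm_num)]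
  have h1 : (if a < b then ((b - a + 3 - 1) / 3).toNat else 0)
      = (if a + 3 < b then ((b - (a + 3) + 3 - 1) / 3).toNat else 0) + 1 := by
    split_ifs <;> omega
  rw [h1, List.range_succ_eq_map]
  simp only [List.map_cons, List.map_map]
  congr 1
  · norm_num
  · refine List.map_congr_left (fun k _ => ?_)
    simp only [Function.comp_apply]
    push_cast; ring

theorem pvFloordiv3 (m : Nat) : (PySem.Int.floordiv (3 * (m : Int)) 3).toNat = m := by
  simp [PySem.Int.floordiv]

theorem pvSlice3 (full : List Int) (m : Nat) :
    PySem.List.slice full (some (3 * (m : Int))) (some (3 * (m : Int) + 3)) =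
      (full.drop (3 * m)).take 3 := by
  have : (3 * (m : Int)) = ((3 * m : Nat) : Int) := by push_cast; ring
  rw [this, show ((3 * m : Nat) : Int) + 3 = ((3 * m : Nat) : Int) + ((3 : Nat) : Int) by norm_num,
      PySem.List.slice_natCast_add]

-- A's pack loop equals writing pvWords of the remaining bytes into consecutive slots
theorem pvPackA_eq (tail full : List Int) :
    ∀ (m : Nat) (p : List Int), full.drop (3 * m) = tail →
    (PySem.List.pyRange (3 * (m : Int)) (3 * (m : Int) + (tail.length : Int)) 3).foldl
      (fun p i =>
        p.set (PySem.Int.floordiv i 3).toNat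
          (pvPackWord (PySem.List.slice full (some i) (some (i + 3))))) p
    = pvApply p (pvWords tail) m := by
  induction tail using pvWords.induct with
  | case1 =>
    intro m p hdrop
    rw [show ((([] : List Int).length : Int)) = 0 by simp, pvRange3_nil _ _ (by omega)]
    rfl
  | case2 a =>
    intro m p hdrop
    rw [pvRange3_cons _ _ (by simp)]
    rw [pvRange3_nil _ _ (by simp)]
    simp only [List.foldl_cons, List.foldl_nil]
    rw [pvSlice3, hdrop, pvFloordiv3]
    simp [pvWords, pvApply, pvPackWord_one]
  | case3 a b =>
    intro m p hdrop
    rw [pvRange3_cons _ _ (by simp)]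
    rw [pvRange3_nil _ _ (by simp)]
    simp only [List.foldl_cons, List.foldl_nil]
    rw [pvSlice3, hdrop, pvFloordiv3]
    simp [pvWords, pvApply, pvPackWord_two]
  | case4 a b c rest ih =>
    intro m p hdrop
    rw [pvRange3_cons _ _ (by simp only [List.length_cons]; push_cast; omega)]
    simp only [List.foldl_cons]
    rw [pvSlice3, hdrop, pvFloordiv3]
    simp only [List.take_succ_cons, List.take_zero]
    have hb : (3 * (m : Int)) + 3 = 3 * ((m + 1 : Nat) : Int) := by push_cast; ring
    have hlen : (3 * (m : Int)) + ((a :: b :: c :: rest).length : Int)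
        = 3 * ((m + 1 : Nat) : Int) + (rest.length : Int) := by
      simp only [List.length_cons]; push_cast; ring
    have hdrop' : full.drop (3 * (m + 1)) = rest := by
      have h := congrArg (List.drop 3) hdrop
      simp only [List.drop_drop, List.drop_succ_cons, List.drop_zero] at h
      convert h using 2
      try omega
    rw [hlen, hb, ih (m + 1) _ hdrop', pvPackWord_three]
    simp [pvWords, pvApply]

-- finalize B's state: pad and pack the leftover buffer
def pvFinish : (List Int × Nat × List Int) → List Int
  | (p, idx, buf) =>
    if buf.isEmpty then p
    else p.set idx (pvWord3 (buf ++ List.replicate (3 - buf.length) 0))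

-- feeding a byte list into an empty buffer then finalizing = writing its packed words
theorem pvFeed_eq (bs : List Int) :
    ∀ (m : Nat) (p : List Int),
      pvFinish (bs.foldl pvFeed (p, m, [])) = pvApply p (pvWords bs) m := by
  induction bs using pvWords.induct with
  | case1 => intro m p; rfl
  | case2 a => intro m p; simp [pvFeed, pvFinish, pvWords, pvApply]
  | case3 a b => intro m p; simp [pvFeed, pvFinish, pvWords, pvApply]
  | case4 a b c rest ih =>
    intro m p
    simp only [List.foldl_cons, pvFeed, List.nil_append]
    norm_num
    rw [ih]
    rfl

-- B's character loop tracks A's byte-collecting loop: same clip decision, state = fed bytes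
theorem pvLoop_eq (cs : List Char) :
    ∀ (acc p0 : List Int),
      (let t := acc.foldl pvFeed (p0, 0, ([] : List Int))
       pvLoopB cs (t.1, t.2.1, t.2.2, (acc.length : Int)))
      = (let acc' := pvCollect cs acc
         let t := acc'.foldl pvFeed (p0, 0, ([] : List Int))
         (t.1, t.2.1, t.2.2, (acc'.length : Int))) := by
  induction cs with
  | nil => intro acc p0; rfl
  | cons c cs ih =>
    intro acc p0
    simp only [pvLoopB, pvCollect]
    by_cases h : ((acc.length : Int) + ((pvUtf8 c).length : Int) > 22)
    · rw [if_pos h, if_pos h]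
    · rw [if_neg h, if_neg h]
      have := ih (acc ++ pvUtf8 c) p0
      simp only [List.foldl_append, List.length_append] at this ⊢
      rw [← this]
      push_cast
      ring_nf

-- ===== VERDICT (by name: the statement is the Claim_ definition above) =====
theorem device_name_to_parameters_spec : Claim_equal_device_name_to_parameters := by
  unfold Claim_equal_device_name_to_parameters
  intro name _
  unfold Spec_device_name_to_parameters
  have hloop := pvLoop_eq name.toList [] (List.replicate 8 0)
  simp only [List.foldl_nil, List.length_nil, Int.natCast_zero] at hloop
  have hA := pvPackA_eq (pvCollect name.toList []) (pvCollect name.toList []) 0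
      (List.replicate 8 0) (by simp)
  simp only [mul_zero, Int.natCast_zero, zero_add] at hA
  have hB := pvFeed_eq (pvCollect name.toList []) 0 (List.replicate 8 0)
  have e1 : device_name_to_parameters name
      = pvApply (List.replicate 8 0) (pvWords (pvCollect name.toList [])) 0 := by
    unfold device_name_to_parameters
    exact hA
  have e2 : device_name_to_parameters_alt name
      = pvApply (List.replicate 8 0) (pvWords (pvCollect name.toList [])) 0 := by
    unfold device_name_to_parameters_alt
    rw [hloop]
    exact hB
  rw [e1, e2]
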